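-- pv_equiv track=rewrite | github.com/jdgambin/logos | app/logosengine.py | andvars
-- ===== SOURCE A (Python) =====
-- def andinsert(a, b):
--     """Retorna una cadena en la que se insertan dos proposiciones-literal como
--         argumentos de una función AND-literal."""
--     return "AND(" + a + "," + b + ")"
--
-- def andvars(props):
--     """Retorna una cadena con funciones AND-literal anidadas para la conjunción
--         de N proposiciones-literal, las inserta en la cadena de manera
--         recursiva."""
--     np = len(props)
--     if np == 1:
--         return props[0]
--     if np == 2:
--         return andinsert(props[0], props[1])
--     joinedprops = [ andinsert(props[0], props[1]) ]
--     return andvars(joinedprops + props[2:])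
-- ===== SOURCE B (Python) =====
-- def andinsert(a, b):
--     return "AND(" + a + "," + b + ")"
--
-- def andvars(props):
--     result = props[0]
--     for p in props[1:]:
--         result = andinsert(result, p)
--     return result
-- ===== Notes on version B (the rewrite author's own statement) =====
-- stated objective: faster
-- what changed: Replaced A's recursion, which rebuilds a fresh list [andinsert(p0,p1)]+props[2:] on every step (quadratic list copying), with a single left fold over props[1:] accumulating the nested AND string.
-- outside the precondition, e.g. on andvars([]): A raises IndexError, B raises IndexError
import Mathlib
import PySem

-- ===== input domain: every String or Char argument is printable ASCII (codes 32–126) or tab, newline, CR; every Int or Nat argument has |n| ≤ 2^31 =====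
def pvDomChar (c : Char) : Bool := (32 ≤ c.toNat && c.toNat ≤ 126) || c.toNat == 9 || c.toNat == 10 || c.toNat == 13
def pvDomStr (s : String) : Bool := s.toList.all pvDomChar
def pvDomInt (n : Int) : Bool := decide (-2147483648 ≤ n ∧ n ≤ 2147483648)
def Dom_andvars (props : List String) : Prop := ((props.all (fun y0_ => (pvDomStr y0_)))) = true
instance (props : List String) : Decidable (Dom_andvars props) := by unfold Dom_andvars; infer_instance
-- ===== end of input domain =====

-- B replaces A's recursion (which rebuilds a fresh list each step) by a left fold over props[1:]; objective: faster (A recopies the tail list on every recursive step, B is a single pass).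

-- ===== PORT A =====
def andinsert (a b : String) : String := "AND(" ++ a ++ "," ++ b ++ ")"

-- A's recursion; the len-based branching is transcribed as a pattern match on the list
-- (the [] branch makes the port total; Python raises IndexError there, excluded by Pre_).
def andvars (props : List String) : String :=
  match props with
  | [] => ""
  | [a] => a
  | [a, b] => andinsert a b
  | a :: b :: rest => andvars (andinsert a b :: rest)
termination_by props.length
decreasing_by simp

-- ===== PORT B =====
def andvars_alt (props : List String) : String :=
  match props with
  | [] => ""  -- Python B raises IndexError on props[0]; excluded by Pre_
  | h :: t => t.foldl (fun acc p => andinsert acc p) h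

-- ===== PRECONDITION & SPEC =====
-- Pre_ excludes the empty list, on which both Pythons raise IndexError (props[0]).
def Pre_andvars (props : List String) : Prop := props ≠ []
instance (props : List String) : Decidable (Pre_andvars props) := by unfold Pre_andvars; infer_instance
def pvWitness_andvars : List String := (["p", "q"])
def Spec_andvars (props : List String) (out : String) : Prop := out = andvars_alt props
instance (props : List String) (out : String) : Decidable (Spec_andvars props out) := by unfold Spec_andvars; infer_instance

-- ===== CLAIM (what is proved, stated in full; the proofs are below) =====
def Claim_equal_andvars : Prop := ∀ (props : List String), Dom_andvars props → Pre_andvars props → Spec_andvars props (andvars props)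

-- ===== LEMMAS AND PROOFS =====
theorem andvars_cons_foldl (t : List String) : ∀ a : String,
    andvars (a :: t) = t.foldl (fun acc p => andinsert acc p) a := by
  induction t with
  | nil => intro a; simp [andvars]
  | cons b rest ih =>
    intro a
    cases rest with
    | nil => simp [andvars, List.foldl]
    | cons c rest' =>
      have h1 : andvars (a :: b :: c :: rest') = andvars (andinsert a b :: c :: rest') := by
        simp [andvars]
      rw [h1, ih (andinsert a b)]
      simp [List.foldl]

-- ===== VERDICT (by name: the statement is the Claim_ definition above) =====
theorem andvars_spec : Claim_equal_andvars := by
  intro props _ hpre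
  cases props with
  | nil => exact absurd rfl hpre
  | cons h t =>
    unfold Spec_andvars andvars_alt
    exact andvars_cons_foldl t h
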